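-- pv_equiv track=rewrite | github.com/mohammadfaiizan/ProjectI | DSA/Problem/Dynamic Programming/02_Grid_Matrix_DP/1444_Number_of_Ways_of_Cutting_a_Pizza.py | ways_to_cut_pizza_brute_force
-- ===== SOURCE A (Python) =====
-- def ways_to_cut_pizza_brute_force(pizza, k):
--     """
--     BRUTE FORCE APPROACH:
--     ====================
--     Try all possible ways to make k-1 cuts recursively.
--
--     Time Complexity: O(4^k * m * n) - exponential in cuts and linear scan for apples
--     Space Complexity: O(k) - recursion depth
--     """
--     MOD = 10**9 + 7
--     rows, cols = len(pizza), len(pizza[0])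
--
--     def has_apple(r1, c1, r2, c2):
--         """Check if rectangle has at least one apple"""
--         for i in range(r1, r2):
--             for j in range(c1, c2):
--                 if pizza[i][j] == 'A':
--                     return True
--         return False
--
--     def dfs(r1, c1, r2, c2, cuts_left):
--         # Base case: no more cuts needed
--         if cuts_left == 0:
--             return 1 if has_apple(r1, c1, r2, c2) else 0
--
--         ways = 0
--
--         # Try horizontal cuts
--         for cut_row in range(r1 + 1, r2):
--             # Top piece: (r1, c1) to (cut_row, c2)
--             # Bottom piece: (cut_row, c1) to (r2, c2)
--             if has_apple(r1, c1, cut_row, c2):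
--                 ways += dfs(cut_row, c1, r2, c2, cuts_left - 1)
--                 ways %= MOD
--
--         # Try vertical cuts
--         for cut_col in range(c1 + 1, c2):
--             # Left piece: (r1, c1) to (r2, cut_col)
--             # Right piece: (r1, cut_col) to (r2, c2)
--             if has_apple(r1, c1, r2, cut_col):
--                 ways += dfs(r1, cut_col, r2, c2, cuts_left - 1)
--                 ways %= MOD
--
--         return ways
--
--     return dfs(0, 0, rows, cols, k - 1)
-- ===== SOURCE B (Python) =====
-- def ways_to_cut_pizza_brute_force(pizza, k):
--     """Bottom-up DP over (start_row, start_col, cuts) with a 2D suffix-sum apple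
--     table, instead of exponential recursion with a rectangle scan per cut."""
--     MOD = 10**9 + 7
--     rows, cols = len(pizza), len(pizza[0])
--     cuts = k - 1
--     if cuts < 0 or cuts > (rows - 1) + (cols - 1):
--         return 0
--     # apples[r][c] = number of apples in pizza[r:rows] restricted to columns [c, cols)
--     apples = [[0] * (cols + 1)]
--     for r in range(rows - 1, -1, -1):
--         row = [0]
--         below = apples[0]
--         for c in range(cols - 1, -1, -1):
--             row.insert(0, row[0] + below[c] - below[c + 1]
--                           + (1 if pizza[r][c] == 'A' else 0))
--         apples.insert(0, row)
--     if apples[0][0] < k:  # fewer apples than pieces: impossible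
--         return 0
--     # dp[r][c] = ways to eat pizza[r:][c:] with the current number of cuts left
--     dp = [[1 if a > 0 else 0 for a in row] for row in apples]
--     for _ in range(cuts):
--         dp = [[(sum(dp[nr][c] if apples[r][c] > apples[nr][c] else 0
--                     for nr in range(r + 1, rows))
--                 + sum(dp[r][nc] if apples[r][c] > apples[r][nc] else 0
--                       for nc in range(c + 1, cols))) % MOD
--                for c in range(cols + 1)]
--               for r in range(rows + 1)]
--     return dp[0][0]
-- ===== Notes on version B (the rewrite author's own statement) =====
-- stated objective: faster
-- what changed: Replaces the exponential recursion (which rescans a rectangle for apples at every cut) by a bottom-up DP table over (start_row, start_col, cuts_left) driven by a precomputed 2D suffix-sum apple-count table, with early 0 when k-1 exceeds the rows+cols-2 possible cuts or the pizza has fewer than k apples.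
-- outside the precondition, e.g. on ways_to_cut_pizza_brute_force(['A', ''], 1): A returns 1, B raises IndexError; on ways_to_cut_pizza_brute_force(['ab', 'x'], 0): A returns 0, B returns 0
import Mathlib
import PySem

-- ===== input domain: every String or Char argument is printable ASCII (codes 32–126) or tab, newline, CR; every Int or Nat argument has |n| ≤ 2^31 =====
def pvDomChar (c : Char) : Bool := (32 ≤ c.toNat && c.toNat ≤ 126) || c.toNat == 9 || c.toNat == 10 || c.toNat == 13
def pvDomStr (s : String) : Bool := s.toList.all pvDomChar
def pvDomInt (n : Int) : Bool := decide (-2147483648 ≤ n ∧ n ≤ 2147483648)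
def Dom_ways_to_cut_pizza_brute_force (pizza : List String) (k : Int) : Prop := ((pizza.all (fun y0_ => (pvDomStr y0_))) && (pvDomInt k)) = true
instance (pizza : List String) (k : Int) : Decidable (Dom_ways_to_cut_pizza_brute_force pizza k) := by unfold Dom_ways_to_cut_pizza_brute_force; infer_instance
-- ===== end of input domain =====

-- B replaces A's exponential recursion (with a rectangle scan per apple test) by a
-- bottom-up DP table over (start_row, start_col, cuts_left) driven by a 2D suffix-sum
-- apple-count table; objective: faster.

-- ===== PORT A =====
-- shared cell accessor: pizza[i][j] == 'A' (indices always in range under Pre_)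
def pvCell (pizza : List String) (i j : Int) : Bool :=
  ((PySem.List.pyGet? pizza i).bind (fun s => PySem.List.pyGet? s.toList j)) == some 'A'

-- has_apple(r1, c1, r2, c2): the double for-loop with early return is List.any
def pvHasApple (pizza : List String) (r1 c1 r2 c2 : Int) : Bool :=
  (PySem.List.pyRange r1 r2 1).any (fun i =>
    (PySem.List.pyRange c1 c2 1).any (fun j => pvCell pizza i j))

-- dfs(r1, c1, r2, c2, cuts_left); each recursive call moves r1 or c1 strictly up
def pvDfs (pizza : List String) (r1 c1 r2 c2 cuts : Int) : Int :=
  if cuts == 0 then (if pvHasApple pizza r1 c1 r2 c2 then 1 else 0)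
  else
    let w1 := (PySem.List.pyRange (r1 + 1) r2 1).attach.foldl
      (fun w cr =>
        if pvHasApple pizza r1 c1 cr.1 c2 then
          PySem.Int.mod (w + pvDfs pizza cr.1 c1 r2 c2 (cuts - 1)) 1000000007
        else w) 0
    (PySem.List.pyRange (c1 + 1) c2 1).attach.foldl
      (fun w cc =>
        if pvHasApple pizza r1 c1 r2 cc.1 then
          PySem.Int.mod (w + pvDfs pizza r1 cc.1 r2 c2 (cuts - 1)) 1000000007
        else w) w1
termination_by ((r2 - r1).toNat + (c2 - c1).toNat)
decreasing_by
  · have h := PySem.List.mem_pyRange_one.mp cr.2; omega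
  · have h := PySem.List.mem_pyRange_one.mp cc.2; omega

-- len(pizza[0]): Pre_ guarantees pizza ≠ [], so headD "" is exact
def ways_to_cut_pizza_brute_force (pizza : List String) (k : Int) : Int :=
  pvDfs pizza 0 0 (pizza.length : Int) ((pizza.headD "").toList.length : Int) (k - 1)

-- ===== PORT B =====
-- t[i][j] (always in range under Pre_, so the defaults are never read)
def pvGet2 (t : List (List Int)) (i j : Int) : Int :=
  PySem.List.pyGetD (PySem.List.pyGetD t i []) j 0

-- inner loop: row built right-to-left by row.insert(0, …)
def pvBuildRow (pizza : List String) (cols : Int) (below : List Int) (r : Int) : List Int :=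
  (PySem.List.pyRange (cols - 1) (-1) (-1)).foldl
    (fun row c =>
      (row.headD 0 + PySem.List.pyGetD below c 0 - PySem.List.pyGetD below (c + 1) 0
        + (if pvCell pizza r c then 1 else 0)) :: row) [0]

-- outer loop: apples table built bottom-to-top by apples.insert(0, row)
def pvApples (pizza : List String) (rows cols : Int) : List (List Int) :=
  (PySem.List.pyRange (rows - 1) (-1) (-1)).foldl
    (fun apples r => pvBuildRow pizza cols (apples.headD []) r :: apples)
    [List.replicate (cols + 1).toNat 0]

-- one dp refresh: dp[r][c] from the previous dp via the two conditional sums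
def pvStep (rows cols : Int) (apples dp : List (List Int)) : List (List Int) :=
  (PySem.List.pyRange 0 (rows + 1) 1).map (fun r =>
    (PySem.List.pyRange 0 (cols + 1) 1).map (fun c =>
      PySem.Int.mod
        (((PySem.List.pyRange (r + 1) rows 1).map (fun nr =>
            if pvGet2 apples nr c < pvGet2 apples r c then pvGet2 dp nr c else 0)).sum
         + ((PySem.List.pyRange (c + 1) cols 1).map (fun nc =>
            if pvGet2 apples r nc < pvGet2 apples r c then pvGet2 dp r nc else 0)).sum)
        1000000007))

def ways_to_cut_pizza_brute_force_alt (pizza : List String) (k : Int) : Int :=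
  let rows : Int := pizza.length
  let cols : Int := (pizza.headD "").toList.length
  let cuts := k - 1
  if cuts < 0 ∨ (rows - 1) + (cols - 1) < cuts then 0
  else
    let apples := pvApples pizza rows cols
    if pvGet2 apples 0 0 < k then 0
    else
    let dp0 := apples.map (fun row => row.map (fun a => if 0 < a then 1 else 0))
    let dpF := (PySem.List.pyRange 0 cuts 1).foldl (fun dp _ => pvStep rows cols apples dp) dp0
    pvGet2 dpF 0 0

-- ===== PRECONDITION & SPEC =====
-- Pre_ restricts to the natural domain of rectangular grids: nonempty pizza whose every
-- row is at least as long as the first row. On ragged grids (a row shorter than the first)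
-- A indexes out of range: it raises IndexError unless its scan stops early (an apple found
-- first, or k <= 0 pruning every scan), while B raises building its count table except
-- when k <= 0, where it returns 0 before reading the grid (as A does when it returns).
def Pre_ways_to_cut_pizza_brute_force (pizza : List String) (k : Int) : Prop :=
  pizza ≠ [] ∧ ∀ s ∈ pizza, (pizza.headD "").toList.length ≤ s.toList.length
instance (pizza : List String) (k : Int) : Decidable (Pre_ways_to_cut_pizza_brute_force pizza k) := by
  unfold Pre_ways_to_cut_pizza_brute_force; infer_instance

def pvWitness_ways_to_cut_pizza_brute_force : List String × Int := (["A.", ".A"], 2)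

def Spec_ways_to_cut_pizza_brute_force (pizza : List String) (k : Int) (out : Int) : Prop := out = ways_to_cut_pizza_brute_force_alt pizza k
instance (pizza : List String) (k : Int) (out : Int) : Decidable (Spec_ways_to_cut_pizza_brute_force pizza k out) := by unfold Spec_ways_to_cut_pizza_brute_force; infer_instance

-- ===== CLAIM (what is proved, stated in full; the proofs are below) =====
def Claim_equal_ways_to_cut_pizza_brute_force : Prop := ∀ (pizza : List String) (k : Int), Dom_ways_to_cut_pizza_brute_force pizza k → Pre_ways_to_cut_pizza_brute_force pizza k → Spec_ways_to_cut_pizza_brute_force pizza k (ways_to_cut_pizza_brute_force pizza k)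

-- ===== LEMMAS AND PROOFS =====

-- number of apples in row i, columns [c1, c2)
def pvRowCnt (pizza : List String) (i c1 c2 : Int) : Int :=
  ((PySem.List.pyRange c1 c2 1).filter (fun j => pvCell pizza i j)).length

-- number of apples in the rectangle [r1, r2) × [c1, c2)
def pvCntR (pizza : List String) (r1 c1 r2 c2 : Int) : Int :=
  ((PySem.List.pyRange r1 r2 1).map (fun i => pvRowCnt pizza i c1 c2)).sum

-- suffix count: apples in [r, rows) × [c, cols)
def pvCnt (pizza : List String) (rows cols r c : Int) : Int :=
  pvCntR pizza r c rows cols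

-- mathematical characterisation of both programs' value with t cuts left from (r, c)
def pvD (pizza : List String) (rows cols : Int) : Nat → Int → Int → Int
  | 0, r, c => if 0 < pvCnt pizza rows cols r c then 1 else 0
  | (t + 1), r, c =>
      (((PySem.List.pyRange (r + 1) rows 1).map (fun nr =>
          if pvCnt pizza rows cols nr c < pvCnt pizza rows cols r c then pvD pizza rows cols t nr c else 0)).sum
       + ((PySem.List.pyRange (c + 1) cols 1).map (fun nc =>
          if pvCnt pizza rows cols r nc < pvCnt pizza rows cols r c then pvD pizza rows cols t r nc else 0)).sum)
      % 1000000007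

-- the shape both B tables have: an indexed (rows+1) × (cols+1) matrix of f
def pvTab (rows cols : Int) (f : Int → Int → Int) : List (List Int) :=
  (PySem.List.pyRange 0 (rows + 1) 1).map (fun r =>
    (PySem.List.pyRange 0 (cols + 1) 1).map (fun c => f r c))

lemma pvMod_eq (a : Int) : PySem.Int.mod a 1000000007 = a % 1000000007 :=
  PySem.Int.mod_eq_emod_of_pos (by norm_num)

lemma pvSum_pos_iff (l : List Int) (h : ∀ x ∈ l, 0 ≤ x) : 0 < l.sum ↔ ∃ x ∈ l, 0 < x := by
  induction l with
  | nil => simp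
  | cons a t ih =>
    have ha := h a (by simp)
    have ht := ih (fun x hx => h x (by simp [hx]))
    have hs : 0 ≤ t.sum := List.sum_nonneg (fun x hx => h x (by simp [hx]))
    simp only [List.sum_cons, List.mem_cons]
    constructor
    · intro hpos
      by_cases h0 : 0 < a
      · exact ⟨a, Or.inl rfl, h0⟩
      · obtain ⟨x, hx, hx0⟩ := ht.mp (by omega)
        exact ⟨x, Or.inr hx, hx0⟩
    · rintro ⟨x, (rfl | hx), hx0⟩
      · omega
      · have := ht.mpr ⟨x, hx, hx0⟩; omega

lemma pvRowCnt_nonneg (pizza : List String) (i c1 c2 : Int) : 0 ≤ pvRowCnt pizza i c1 c2 := by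
  unfold pvRowCnt; positivity

lemma pvCntR_nonneg (pizza : List String) (r1 c1 r2 c2 : Int) : 0 ≤ pvCntR pizza r1 c1 r2 c2 := by
  unfold pvCntR
  apply List.sum_nonneg
  intro x hx
  obtain ⟨i, -, rfl⟩ := List.mem_map.mp hx
  unfold pvRowCnt
  positivity

lemma pvHasApple_eq (pizza : List String) (r1 c1 r2 c2 : Int) :
    pvHasApple pizza r1 c1 r2 c2 = decide (0 < pvCntR pizza r1 c1 r2 c2) := by
  rw [Bool.eq_iff_iff]
  unfold pvHasApple pvCntR
  rw [decide_eq_true_eq,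
    pvSum_pos_iff _ (by intro x hx; obtain ⟨i, -, rfl⟩ := List.mem_map.mp hx
                        exact pvRowCnt_nonneg pizza i c1 c2)]
  simp only [List.any_eq_true, List.mem_map]
  constructor
  · rintro ⟨i, hi, j, hj, hc⟩
    refine ⟨pvRowCnt pizza i c1 c2, ⟨i, hi, rfl⟩, ?_⟩
    unfold pvRowCnt
    have hm : j ∈ (PySem.List.pyRange c1 c2 1).filter (fun j => pvCell pizza i j) :=
      List.mem_filter.mpr ⟨hj, hc⟩
    have := List.length_pos_of_mem hm
    omega
  · rintro ⟨x, ⟨i, hi, rfl⟩, hx⟩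
    refine ⟨i, hi, ?_⟩
    unfold pvRowCnt at hx
    have hl : 0 < ((PySem.List.pyRange c1 c2 1).filter (fun j => pvCell pizza i j)).length := by omega
    obtain ⟨j, hj⟩ := List.exists_mem_of_length_pos hl
    exact ⟨j, (List.mem_filter.mp hj).1, (List.mem_filter.mp hj).2⟩

-- splitting the rectangle at a row
lemma pvCntR_row_split (pizza : List String) (r1 c1 rm r2 c2 : Int) (h1 : r1 ≤ rm) (h2 : rm ≤ r2) :
    pvCntR pizza r1 c1 r2 c2 = pvCntR pizza r1 c1 rm c2 + pvCntR pizza rm c1 r2 c2 := by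
  unfold pvCntR
  rw [PySem.List.pyRange_one_append r1 rm r2 h1 h2, List.map_append, List.sum_append]

-- splitting the rectangle at a column
lemma pvCntR_col_split (pizza : List String) (r1 c1 cm r2 c2 : Int) (h1 : c1 ≤ cm) (h2 : cm ≤ c2) :
    pvCntR pizza r1 c1 r2 c2 = pvCntR pizza r1 c1 r2 cm + pvCntR pizza r1 cm r2 c2 := by
  unfold pvCntR
  have hrow : ∀ i : Int, pvRowCnt pizza i c1 c2 = pvRowCnt pizza i c1 cm + pvRowCnt pizza i cm c2 := by
    intro i
    unfold pvRowCnt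
    rw [PySem.List.pyRange_one_append c1 cm c2 h1 h2, List.filter_append, List.length_append]
    push_cast; ring
  rw [show (fun i => pvRowCnt pizza i c1 c2)
        = fun i => pvRowCnt pizza i c1 cm + pvRowCnt pizza i cm c2 from funext hrow]
  rw [← List.sum_map_add]

-- the two cut tests of A, phrased through the suffix counts
lemma pvHasApple_hcut (pizza : List String) (rows cols r1 c1 cr : Int)
    (h1 : r1 ≤ cr) (h2 : cr ≤ rows) :
    pvHasApple pizza r1 c1 cr cols
      = decide (pvCnt pizza rows cols cr c1 < pvCnt pizza rows cols r1 c1) := by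
  rw [pvHasApple_eq]
  have hs := pvCntR_row_split pizza r1 c1 cr rows cols h1 h2
  rw [decide_eq_decide]
  unfold pvCnt
  omega

lemma pvHasApple_vcut (pizza : List String) (rows cols r1 c1 cc : Int)
    (h1 : c1 ≤ cc) (h2 : cc ≤ cols) :
    pvHasApple pizza r1 c1 rows cc
      = decide (pvCnt pizza rows cols r1 cc < pvCnt pizza rows cols r1 c1) := by
  rw [pvHasApple_eq]
  have hs := pvCntR_col_split pizza r1 c1 cc rows cols h1 h2
  rw [decide_eq_decide]
  unfold pvCnt
  omega

-- the iterated-mod accumulation of A's dfs loops is a plain conditional sum mod M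
lemma pvFoldl_mod (p : Int → Bool) (f : Int → Int) :
    ∀ (l : List Int) (s : Int),
      l.foldl (fun w x => if p x then (w + f x) % 1000000007 else w) (s % 1000000007)
        = (s + (l.map (fun x => if p x then f x else 0)).sum) % 1000000007 := by
  intro l
  induction l with
  | nil => intro s; simp
  | cons x t ih =>
    intro s
    simp only [List.foldl_cons, List.map_cons, List.sum_cons]
    by_cases hp : p x
    · rw [if_pos hp, Int.emod_add_emod, ih (s + f x)]
      congr 1
      simp only [if_pos hp]
      ring
    · rw [if_neg hp, ih s]
      congr 1
      simp only [if_neg hp]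
      ring


-- a fold of A's shape over zero summands stays 0
lemma pvFoldl_zero {α : Type} (p : α → Bool) (g : α → Int) :
    ∀ (l : List α), (∀ x ∈ l, g x = 0) →
      l.foldl (fun w x => if p x then PySem.Int.mod (w + g x) 1000000007 else w) 0 = 0 := by
  intro l
  induction l with
  | nil => intro _; rfl
  | cons x t ih =>
    intro h
    simp only [List.foldl_cons]
    by_cases hp : p x
    · rw [if_pos hp, h x (by simp)]
      rw [show PySem.Int.mod ((0 : Int) + 0) 1000000007 = 0 by rw [pvMod_eq]; rfl]
      exact ih fun y hy => h y (by simp [hy])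
    · rw [if_neg hp]
      exact ih fun y hy => h y (by simp [hy])

-- degenerate cut counts: A returns 0 whenever cuts < 0 or more cuts than cells allow
lemma pvDfs_degenerate (pizza : List String) :
    ∀ (n : Nat) (r1 c1 r2 c2 cuts : Int),
      (r2 - r1).toNat + (c2 - c1).toNat ≤ n →
      (cuts < 0 ∨ (r2 - r1 - 1) + (c2 - c1 - 1) < cuts) →
      pvDfs pizza r1 c1 r2 c2 cuts = 0 := by
  intro n
  induction n with
  | zero =>
    intro r1 c1 r2 c2 cuts hm _
    rw [pvDfs]
    have h1 : r2 ≤ r1 := by omega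
    have h2 : c2 ≤ c1 := by omega
    by_cases h0 : cuts = 0
    · rw [if_pos (by simp [h0])]
      have h : pvHasApple pizza r1 c1 r2 c2 = false := by
        unfold pvHasApple
        rw [PySem.List.pyRange_one_eq_nil h1]
        rfl
      rw [h]; rfl
    · rw [if_neg (by simp [h0])]
      rw [PySem.List.pyRange_one_eq_nil (show r2 ≤ r1 + 1 by omega),
          PySem.List.pyRange_one_eq_nil (show c2 ≤ c1 + 1 by omega)]
      rfl
  | succ n ih =>
    intro r1 c1 r2 c2 cuts hm hc
    rw [pvDfs]
    by_cases h0 : cuts = 0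
    · subst h0
      rw [if_pos (by simp)]
      have hdisj : r2 ≤ r1 ∨ c2 ≤ c1 := by omega
      have h : pvHasApple pizza r1 c1 r2 c2 = false := by
        unfold pvHasApple
        rcases hdisj with h | h
        · rw [PySem.List.pyRange_one_eq_nil h]; rfl
        · rw [PySem.List.pyRange_one_eq_nil h]; simp
      rw [h]; rfl
    · rw [if_neg (by simp [h0])]
      have hz1 : (PySem.List.pyRange (r1 + 1) r2 1).attach.foldl
          (fun w cr =>
            if pvHasApple pizza r1 c1 cr.1 c2 then
              PySem.Int.mod (w + pvDfs pizza cr.1 c1 r2 c2 (cuts - 1)) 1000000007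
            else w) 0 = 0 := by
        apply pvFoldl_zero
        intro x _
        have hb := PySem.List.mem_pyRange_one.mp x.2
        apply ih
        · omega
        · rcases hc with h | h
          · left; omega
          · right; omega
      rw [hz1]
      show (PySem.List.pyRange (c1 + 1) c2 1).attach.foldl _ 0 = 0
      apply pvFoldl_zero
      intro x _
      have hb := PySem.List.mem_pyRange_one.mp x.2
      apply ih
      · omega
      · rcases hc with h | h
        · left; omega
        · right; omega


-- with fewer apples left than pieces still needed, A's dfs returns 0
lemma pvDfs_few (pizza : List String) (rows cols : Int) :
    ∀ (t : Nat) (r1 c1 : Int),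
      pvCnt pizza rows cols r1 c1 < (t : Int) + 1 →
      pvDfs pizza r1 c1 rows cols (t : Int) = 0 := by
  intro t
  induction t with
  | zero =>
    intro r1 c1 hfew
    rw [pvDfs]
    rw [if_pos (by simp)]
    rw [pvHasApple_eq]
    have := pvCntR_nonneg pizza r1 c1 rows cols
    rw [decide_eq_false (show ¬(0 < pvCntR pizza r1 c1 rows cols) from by
      unfold pvCnt at hfew; omega)]
    rfl
  | succ t ih =>
    intro r1 c1 hfew
    rw [pvDfs]
    rw [if_neg (show ¬(((((t : Nat) + 1 : Nat) : Int)) == 0) = true by simp; omega)]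
    have hcast : (((t : Nat) + 1 : Nat) : Int) - 1 = (t : Int) := by push_cast; ring
    rw [hcast]
    have hz1 : (PySem.List.pyRange (r1 + 1) rows 1).attach.foldl
        (fun w cr =>
          if pvHasApple pizza r1 c1 cr.1 cols then
            PySem.Int.mod (w + pvDfs pizza cr.1 c1 rows cols (t : Int)) 1000000007
          else w) 0 = 0 := by
      rw [PySem.List.foldl_congr_mem _ _
        (fun w cr => if pvHasApple pizza r1 c1 cr.1 cols then
            PySem.Int.mod (w + 0) 1000000007 else w) 0
        (by
          intro acc x _
          have hb := PySem.List.mem_pyRange_one.mp x.2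
          by_cases hcut : pvHasApple pizza r1 c1 x.1 cols
          · simp only [if_pos hcut]
            rw [pvHasApple_hcut pizza rows cols r1 c1 x.1 (by omega) (by omega)] at hcut
            have hlt := of_decide_eq_true hcut
            have hsplit := pvCntR_row_split pizza r1 c1 x.1 rows cols (by omega) (by omega)
            rw [ih x.1 c1 (by unfold pvCnt at hfew hlt ⊢; push_cast at hfew ⊢; omega)]
          · simp only [if_neg hcut])]
      exact pvFoldl_zero _ (fun _ => 0) _ (fun _ _ => rfl)
    rw [hz1]
    show (PySem.List.pyRange (c1 + 1) cols 1).attach.foldl _ 0 = 0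
    rw [PySem.List.foldl_congr_mem _ _
      (fun w cc => if pvHasApple pizza r1 c1 rows cc.1 then
          PySem.Int.mod (w + 0) 1000000007 else w) 0
      (by
        intro acc x _
        have hb := PySem.List.mem_pyRange_one.mp x.2
        by_cases hcut : pvHasApple pizza r1 c1 rows x.1
        · simp only [if_pos hcut]
          rw [pvHasApple_vcut pizza rows cols r1 c1 x.1 (by omega) (by omega)] at hcut
          have hlt := of_decide_eq_true hcut
          rw [ih r1 x.1 (by push_cast at hfew ⊢; omega)]
        · simp only [if_neg hcut])]
    exact pvFoldl_zero _ (fun _ => 0) _ (fun _ _ => rfl)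

-- main correspondence: A's dfs from (r1, c1) with t cuts is the DP value pvD t r1 c1
lemma pvDfs_eq_pvD (pizza : List String) (rows cols : Int) :
    ∀ (t : Nat) (r1 c1 : Int),
      pvDfs pizza r1 c1 rows cols (t : Int) = pvD pizza rows cols t r1 c1 := by
  intro t
  induction t with
  | zero =>
    intro r1 c1
    rw [pvDfs]
    rw [if_pos (by simp)]
    rw [pvHasApple_eq]
    simp only [pvD, decide_eq_true_eq]
    rfl
  | succ t ih =>
    intro r1 c1
    rw [pvDfs]
    rw [if_neg (show ¬(((((t : Nat) + 1 : Nat) : Int)) == 0) = true by simp; omega)]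
    have hcast : (((t : Nat) + 1 : Nat) : Int) - 1 = (t : Int) := by push_cast; ring
    rw [hcast]
    have e1 : (PySem.List.pyRange (r1 + 1) rows 1).attach.foldl
        (fun w cr =>
          if pvHasApple pizza r1 c1 cr.1 cols then
            PySem.Int.mod (w + pvDfs pizza cr.1 c1 rows cols (t : Int)) 1000000007
          else w) 0
        = (0 + ((PySem.List.pyRange (r1 + 1) rows 1).map (fun nr =>
            if decide (pvCnt pizza rows cols nr c1 < pvCnt pizza rows cols r1 c1)
            then pvD pizza rows cols t nr c1 else 0)).sum) % 1000000007 := by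
      rw [PySem.List.foldl_congr_mem _ _
        (fun w cr => if decide (pvCnt pizza rows cols cr.1 c1 < pvCnt pizza rows cols r1 c1)
          then (w + pvD pizza rows cols t cr.1 c1) % 1000000007 else w) 0
        (by
          intro acc x _
          have hb := PySem.List.mem_pyRange_one.mp x.2
          rw [pvHasApple_hcut pizza rows cols r1 c1 x.1 (by omega) (by omega), ih x.1 c1, pvMod_eq])]
      rw [List.foldl_attach
        (f := fun (w y : Int) => if decide (pvCnt pizza rows cols y c1 < pvCnt pizza rows cols r1 c1)
          then (w + pvD pizza rows cols t y c1) % 1000000007 else w) (b := (0 : Int))]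
      exact pvFoldl_mod _ _ _ 0
    rw [e1]
    have e2 : (PySem.List.pyRange (c1 + 1) cols 1).attach.foldl
        (fun w cc =>
          if pvHasApple pizza r1 c1 rows cc.1 then
            PySem.Int.mod (w + pvDfs pizza r1 cc.1 rows cols (t : Int)) 1000000007
          else w)
        ((0 + ((PySem.List.pyRange (r1 + 1) rows 1).map (fun nr =>
            if decide (pvCnt pizza rows cols nr c1 < pvCnt pizza rows cols r1 c1)
            then pvD pizza rows cols t nr c1 else 0)).sum) % 1000000007)
        = ((0 + ((PySem.List.pyRange (r1 + 1) rows 1).map (fun nr =>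
            if decide (pvCnt pizza rows cols nr c1 < pvCnt pizza rows cols r1 c1)
            then pvD pizza rows cols t nr c1 else 0)).sum)
           + ((PySem.List.pyRange (c1 + 1) cols 1).map (fun nc =>
            if decide (pvCnt pizza rows cols r1 nc < pvCnt pizza rows cols r1 c1)
            then pvD pizza rows cols t r1 nc else 0)).sum) % 1000000007 := by
      rw [PySem.List.foldl_congr_mem _ _
        (fun w cc => if decide (pvCnt pizza rows cols r1 cc.1 < pvCnt pizza rows cols r1 c1)
          then (w + pvD pizza rows cols t r1 cc.1) % 1000000007 else w) _
        (by
          intro acc x _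
          have hb := PySem.List.mem_pyRange_one.mp x.2
          rw [pvHasApple_vcut pizza rows cols r1 c1 x.1 (by omega) (by omega), ih r1 x.1, pvMod_eq])]
      rw [List.foldl_attach
        (f := fun (w y : Int) => if decide (pvCnt pizza rows cols r1 y < pvCnt pizza rows cols r1 c1)
          then (w + pvD pizza rows cols t r1 y) % 1000000007 else w)]
      exact pvFoldl_mod _ _ _ _
    refine e2.trans ?_
    simp only [pvD, decide_eq_true_eq, zero_add]

-- the recurrence the suffix-sum construction uses
lemma pvCnt_rec (pizza : List String) (rows cols r c : Int) (hr : r < rows) (hc : c < cols) :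
    pvCnt pizza rows cols r c
      = pvCnt pizza rows cols r (c + 1) + pvCnt pizza rows cols (r + 1) c
        - pvCnt pizza rows cols (r + 1) (c + 1)
        + (if pvCell pizza r c then 1 else 0) := by
  have h1 : pvCnt pizza rows cols r c = pvRowCnt pizza r c cols + pvCnt pizza rows cols (r + 1) c := by
    unfold pvCnt
    rw [pvCntR_row_split pizza r c (r + 1) rows cols (by omega) (by omega)]
    congr 1
    unfold pvCntR
    rw [PySem.List.pyRange_one_singleton]
    simp
  have h2 : pvCnt pizza rows cols r (c + 1)
      = pvRowCnt pizza r (c + 1) cols + pvCnt pizza rows cols (r + 1) (c + 1) := by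
    unfold pvCnt
    rw [pvCntR_row_split pizza r (c + 1) (r + 1) rows cols (by omega) (by omega)]
    congr 1
    unfold pvCntR
    rw [PySem.List.pyRange_one_singleton]
    simp
  have h3 : pvRowCnt pizza r c cols
      = (if pvCell pizza r c then 1 else 0) + pvRowCnt pizza r (c + 1) cols := by
    unfold pvRowCnt
    rw [PySem.List.pyRange_one_cons hc, List.filter_cons]
    by_cases hcell : pvCell pizza r c
    · simp [hcell]
      omega
    · simp [hcell]
  omega


-- the inner (column) loop turns the suffix row for r+1 into the suffix row for r
lemma pvBuildRow_eq (pizza : List String) (rows cols r : Int)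
    (hc : 0 ≤ cols) (hr : r < rows) :
    pvBuildRow pizza cols
        ((PySem.List.pyRange 0 (cols + 1) 1).map (fun c => pvCnt pizza rows cols (r + 1) c)) r
      = (PySem.List.pyRange 0 (cols + 1) 1).map (fun c => pvCnt pizza rows cols r c) := by
  unfold pvBuildRow
  suffices h : ∀ (m : Nat) (ccur : Int), -1 ≤ ccur → ccur ≤ cols - 1 → (ccur + 1).toNat = m →
      (PySem.List.pyRange ccur (-1) (-1)).foldl
        (fun row c =>
          (row.headD 0
            + PySem.List.pyGetD ((PySem.List.pyRange 0 (cols + 1) 1).map (fun c => pvCnt pizza rows cols (r + 1) c)) c 0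
            - PySem.List.pyGetD ((PySem.List.pyRange 0 (cols + 1) 1).map (fun c => pvCnt pizza rows cols (r + 1) c)) (c + 1) 0
            + (if pvCell pizza r c then 1 else 0)) :: row)
        ((PySem.List.pyRange (ccur + 1) (cols + 1) 1).map (fun c => pvCnt pizza rows cols r c))
      = (PySem.List.pyRange 0 (cols + 1) 1).map (fun c => pvCnt pizza rows cols r c) by
    have hinit : ((PySem.List.pyRange (cols - 1 + 1) (cols + 1) 1).map (fun c => pvCnt pizza rows cols r c))
        = [0] := by
      rw [show cols - 1 + 1 = cols by ring, PySem.List.pyRange_one_singleton]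
      simp only [List.map_cons, List.map_nil]
      have : pvCnt pizza rows cols r cols = 0 := by
        unfold pvCnt pvCntR
        have : ∀ i : Int, pvRowCnt pizza i cols cols = 0 := by
          intro i
          unfold pvRowCnt
          rw [PySem.List.pyRange_one_eq_nil le_rfl]
          rfl
        simp [this]
      rw [this]
    have := h (cols - 1 + 1).toNat (cols - 1) (by omega) le_rfl rfl
    rw [hinit] at this
    exact this
  intro m
  induction m with
  | zero =>
    intro ccur h1 h2 hm
    have : ccur = -1 := by omega
    subst this
    rw [PySem.List.pyRange_neg_one_eq_nil le_rfl]
    norm_num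
  | succ m ih =>
    intro ccur h1 h2 hm
    have hc0 : 0 ≤ ccur := by omega
    rw [PySem.List.pyRange_neg_one_cons (show (-1 : Int) < ccur by omega), List.foldl_cons]
    have hhead : ((PySem.List.pyRange (ccur + 1) (cols + 1) 1).map (fun c => pvCnt pizza rows cols r c)).headD 0
        = pvCnt pizza rows cols r (ccur + 1) := by
      rw [PySem.List.pyRange_one_cons (by omega)]
      rfl
    have hg1 : PySem.List.pyGetD ((PySem.List.pyRange 0 (cols + 1) 1).map (fun c => pvCnt pizza rows cols (r + 1) c)) ccur 0
        = pvCnt pizza rows cols (r + 1) ccur :=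
      PySem.List.pyGetD_map_pyRange_of_nonneg _ (cols + 1) ccur _ hc0 (by omega)
    have hg2 : PySem.List.pyGetD ((PySem.List.pyRange 0 (cols + 1) 1).map (fun c => pvCnt pizza rows cols (r + 1) c)) (ccur + 1) 0
        = pvCnt pizza rows cols (r + 1) (ccur + 1) :=
      PySem.List.pyGetD_map_pyRange_of_nonneg _ (cols + 1) (ccur + 1) _ (by omega) (by omega)
    rw [hhead, hg1, hg2]
    rw [show pvCnt pizza rows cols r (ccur + 1) + pvCnt pizza rows cols (r + 1) ccur
          - pvCnt pizza rows cols (r + 1) (ccur + 1) + (if pvCell pizza r ccur then 1 else 0)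
        = pvCnt pizza rows cols r ccur from
      (pvCnt_rec pizza rows cols r ccur hr (by omega)).symm]
    rw [show pvCnt pizza rows cols r ccur
          :: (PySem.List.pyRange (ccur + 1) (cols + 1) 1).map (fun c => pvCnt pizza rows cols r c)
        = (PySem.List.pyRange ccur (cols + 1) 1).map (fun c => pvCnt pizza rows cols r c) from by
      conv_rhs => rw [PySem.List.pyRange_one_cons (show ccur < cols + 1 by omega)]
      rfl]
    have := ih (ccur - 1) (by omega) (by omega) (by omega)
    rwa [show ccur - 1 + 1 = ccur from by ring] at this

-- B's apples table is the suffix-count table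
lemma pvApples_eq (pizza : List String) (rows cols : Int) (hr : 0 ≤ rows) (hc : 0 ≤ cols) :
    pvApples pizza rows cols = pvTab rows cols (pvCnt pizza rows cols) := by
  unfold pvApples
  suffices h : ∀ (m : Nat) (rcur : Int), -1 ≤ rcur → rcur ≤ rows - 1 → (rcur + 1).toNat = m →
      (PySem.List.pyRange rcur (-1) (-1)).foldl
        (fun apples r => pvBuildRow pizza cols (apples.headD []) r :: apples)
        ((PySem.List.pyRange (rcur + 1) (rows + 1) 1).map
          (fun r => (PySem.List.pyRange 0 (cols + 1) 1).map (fun c => pvCnt pizza rows cols r c)))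
      = pvTab rows cols (pvCnt pizza rows cols) by
    have hlast : ((PySem.List.pyRange (rows - 1 + 1) (rows + 1) 1).map
        (fun r => (PySem.List.pyRange 0 (cols + 1) 1).map (fun c => pvCnt pizza rows cols r c)))
        = [List.replicate (cols + 1).toNat 0] := by
      rw [show rows - 1 + 1 = rows by ring, PySem.List.pyRange_one_singleton]
      simp only [List.map_cons, List.map_nil]
      congr 1
      have hz : ∀ c ∈ PySem.List.pyRange 0 (cols + 1) 1, pvCnt pizza rows cols rows c = (0 : Int) := by
        intro c _
        unfold pvCnt pvCntR
        rw [PySem.List.pyRange_one_eq_nil le_rfl]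
        rfl
      rw [List.map_congr_left hz, List.map_const', PySem.List.length_pyRange_one]
      norm_num
    have := h (rows - 1 + 1).toNat (rows - 1) (by omega) le_rfl rfl
    rw [hlast] at this
    exact this
  intro m
  induction m with
  | zero =>
    intro rcur h1 h2 hm
    have : rcur = -1 := by omega
    subst this
    rw [PySem.List.pyRange_neg_one_eq_nil le_rfl]
    norm_num
    rfl
  | succ m ih =>
    intro rcur h1 h2 hm
    have hr0 : 0 ≤ rcur := by omega
    rw [PySem.List.pyRange_neg_one_cons (show (-1 : Int) < rcur by omega), List.foldl_cons]
    have hhead : ((PySem.List.pyRange (rcur + 1) (rows + 1) 1).map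
        (fun r => (PySem.List.pyRange 0 (cols + 1) 1).map (fun c => pvCnt pizza rows cols r c))).headD []
        = (PySem.List.pyRange 0 (cols + 1) 1).map (fun c => pvCnt pizza rows cols (rcur + 1) c) := by
      rw [PySem.List.pyRange_one_cons (a := rcur + 1) (b := rows + 1) (by omega)]
      rfl
    rw [hhead, pvBuildRow_eq pizza rows cols rcur hc (by omega)]
    rw [show ((PySem.List.pyRange 0 (cols + 1) 1).map (fun c => pvCnt pizza rows cols rcur c))
          :: (PySem.List.pyRange (rcur + 1) (rows + 1) 1).map
              (fun r => (PySem.List.pyRange 0 (cols + 1) 1).map (fun c => pvCnt pizza rows cols r c))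
        = (PySem.List.pyRange rcur (rows + 1) 1).map
            (fun r => (PySem.List.pyRange 0 (cols + 1) 1).map (fun c => pvCnt pizza rows cols r c)) from by
      conv_rhs => rw [PySem.List.pyRange_one_cons (show rcur < rows + 1 by omega)]
      rfl]
    have := ih (rcur - 1) (by omega) (by omega) (by omega)
    rwa [show rcur - 1 + 1 = rcur from by ring] at this

lemma pvGet2_tab (rows cols : Int) (f : Int → Int → Int) (i j : Int)
    (hi0 : 0 ≤ i) (hi : i ≤ rows) (hj0 : 0 ≤ j) (hj : j ≤ cols) :
    pvGet2 (pvTab rows cols f) i j = f i j := by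
  unfold pvGet2 pvTab
  rw [PySem.List.pyGetD_map_pyRange_of_nonneg _ (rows + 1) i _ hi0 (by omega)]
  rw [PySem.List.pyGetD_map_pyRange_of_nonneg _ (cols + 1) j _ hj0 (by omega)]

-- one pvStep on the table of pvD t gives the table of pvD (t+1)
lemma pvStep_tab (pizza : List String) (rows cols : Int) (t : Nat) :
    pvStep rows cols (pvTab rows cols (pvCnt pizza rows cols)) (pvTab rows cols (pvD pizza rows cols t))
      = pvTab rows cols (pvD pizza rows cols (t + 1)) := by
  unfold pvStep
  conv_rhs => rw [pvTab]
  apply List.map_congr_left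
  intro r hrm
  have hrb := PySem.List.mem_pyRange_one.mp hrm
  apply List.map_congr_left
  intro c hcm
  have hcb := PySem.List.mem_pyRange_one.mp hcm
  rw [pvMod_eq]
  have hs1 : (PySem.List.pyRange (r + 1) rows 1).map (fun nr =>
        if pvGet2 (pvTab rows cols (pvCnt pizza rows cols)) nr c
            < pvGet2 (pvTab rows cols (pvCnt pizza rows cols)) r c
        then pvGet2 (pvTab rows cols (pvD pizza rows cols t)) nr c else 0)
      = (PySem.List.pyRange (r + 1) rows 1).map (fun nr =>
        if pvCnt pizza rows cols nr c < pvCnt pizza rows cols r c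
        then pvD pizza rows cols t nr c else 0) := by
    apply List.map_congr_left
    intro nr hnrm
    have hnrb := PySem.List.mem_pyRange_one.mp hnrm
    rw [pvGet2_tab rows cols _ nr c (by omega) (by omega) (by omega) (by omega),
        pvGet2_tab rows cols _ r c (by omega) (by omega) (by omega) (by omega),
        pvGet2_tab rows cols _ nr c (by omega) (by omega) (by omega) (by omega)]
  have hs2 : (PySem.List.pyRange (c + 1) cols 1).map (fun nc =>
        if pvGet2 (pvTab rows cols (pvCnt pizza rows cols)) r nc
            < pvGet2 (pvTab rows cols (pvCnt pizza rows cols)) r c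
        then pvGet2 (pvTab rows cols (pvD pizza rows cols t)) r nc else 0)
      = (PySem.List.pyRange (c + 1) cols 1).map (fun nc =>
        if pvCnt pizza rows cols r nc < pvCnt pizza rows cols r c
        then pvD pizza rows cols t r nc else 0) := by
    apply List.map_congr_left
    intro nc hncm
    have hncb := PySem.List.mem_pyRange_one.mp hncm
    rw [pvGet2_tab rows cols _ r nc (by omega) (by omega) (by omega) (by omega),
        pvGet2_tab rows cols _ r c (by omega) (by omega) (by omega) (by omega),
        pvGet2_tab rows cols _ r nc (by omega) (by omega) (by omega) (by omega)]
  rw [hs1, hs2]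
  simp only [pvD]

-- iterating the step cuts times from the dp0 table
lemma pvFold_step (pizza : List String) (rows cols : Int) :
    ∀ (t : Nat),
      (PySem.List.pyRange 0 (t : Int) 1).foldl
          (fun dp _ => pvStep rows cols (pvTab rows cols (pvCnt pizza rows cols)) dp)
          (pvTab rows cols (pvD pizza rows cols 0))
        = pvTab rows cols (pvD pizza rows cols t) := by
  intro t
  induction t with
  | zero =>
    rw [show ((0 : Nat) : Int) = 0 from rfl, PySem.List.pyRange_one_eq_nil le_rfl]
    rfl
  | succ t ih =>
    rw [show (((t : Nat) + 1 : Nat) : Int) = (t : Int) + 1 from by push_cast; ring]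
    rw [PySem.List.pyRange_one_succ_right (by exact_mod_cast Int.natCast_nonneg t), List.foldl_append,
        ih, List.foldl_cons, List.foldl_nil]
    exact pvStep_tab pizza rows cols t

-- B's dp0 is the table of pvD 0
lemma pvDp0_eq (pizza : List String) (rows cols : Int) :
    (pvTab rows cols (pvCnt pizza rows cols)).map (fun row => row.map (fun a => if 0 < a then 1 else 0))
      = pvTab rows cols (pvD pizza rows cols 0) := by
  unfold pvTab
  rw [List.map_map]
  apply List.map_congr_left
  intro r _
  simp only [Function.comp, List.map_map]
  apply List.map_congr_left
  intro c _
  simp [pvD]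

-- ===== VERDICT (by name: the statement is the Claim_ definition above) =====
theorem ways_to_cut_pizza_brute_force_spec : Claim_equal_ways_to_cut_pizza_brute_force := by
  intro pizza k _ _
  unfold Spec_ways_to_cut_pizza_brute_force
  simp only [ways_to_cut_pizza_brute_force, ways_to_cut_pizza_brute_force_alt]
  have hr : (0 : Int) ≤ (pizza.length : Int) := by positivity
  have hc : (0 : Int) ≤ ((pizza.headD "").toList.length : Int) := by positivity
  by_cases hdeg : k - 1 < 0 ∨ ((pizza.length : Int) - 1) + (((pizza.headD "").toList.length : Int) - 1) < k - 1
  · rw [if_pos hdeg]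
    exact pvDfs_degenerate pizza ((pizza.length : Int).toNat + ((pizza.headD "").toList.length : Int).toNat)
      0 0 _ _ (k - 1) (by omega) (by omega)
  · rw [if_neg hdeg]
    push Not at hdeg
    obtain ⟨h0, h1⟩ := hdeg
    obtain ⟨t, ht⟩ : ∃ t : Nat, k - 1 = (t : Int) := ⟨(k - 1).toNat, by omega⟩
    rw [ht]
    rw [pvApples_eq pizza _ _ hr hc]
    rw [pvGet2_tab _ _ _ 0 0 le_rfl hr le_rfl hc]
    by_cases hfew : pvCnt pizza (pizza.length : Int) ((pizza.headD "").toList.length : Int) 0 0 < k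
    · rw [if_pos hfew]
      exact pvDfs_few pizza _ _ t 0 0 (by omega)
    · rw [if_neg hfew]
      rw [pvDfs_eq_pvD pizza _ _ t 0 0]
      rw [pvDp0_eq pizza _ _]
      rw [pvFold_step pizza _ _ t]
      rw [pvGet2_tab _ _ _ 0 0 le_rfl hr le_rfl hc]
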